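-- pv_equiv track=rewrite | github.com/CcccFz/algo | beauty/12_think/04_dp/03_yh_triangle.py | yh_triangle2
-- ===== SOURCE A (Python) =====
-- def yh_triangle2(nums):
--     n = len(nums)
--     state = [0] * n
--     state[0] = nums[0][0]
--
--     for i in range(1, n):
--         for j in range(i, -1, -1):
--             if j == i:
--                 state[j] = nums[i][j] + state[j-1]
--             elif j == 0:
--                 state[j] = nums[i][j] + state[j]
--             else:
--                 state[j] = nums[i][j] + min(state[j-1], state[j])
--     return min(state)
-- ===== SOURCE B (Python) =====
-- def yh_triangle2(nums):
--     # Bottom-up DP: fold the triangle upward; state[j] = min path sum from cell (i, j) to the base.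
--     state = list(nums[-1])
--     for i in range(len(nums) - 2, -1, -1):
--         row = nums[i]
--         for j in range(i + 1):
--             state[j] = row[j] + min(state[j], state[j + 1])
--     return state[0]
-- ===== Notes on version B (the rewrite author's own statement) =====
-- stated objective: alternative
-- what changed: Replaces A's apex-first DP (descending in-place sweep with three boundary branches, then min over the whole final row) by a base-first DP that folds the triangle upward with the single uniform recurrence state[j] = row[j] + min(state[j], state[j+1]) and returns state[0] directly, with no boundary cases and no final min pass.
import Mathlib
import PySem

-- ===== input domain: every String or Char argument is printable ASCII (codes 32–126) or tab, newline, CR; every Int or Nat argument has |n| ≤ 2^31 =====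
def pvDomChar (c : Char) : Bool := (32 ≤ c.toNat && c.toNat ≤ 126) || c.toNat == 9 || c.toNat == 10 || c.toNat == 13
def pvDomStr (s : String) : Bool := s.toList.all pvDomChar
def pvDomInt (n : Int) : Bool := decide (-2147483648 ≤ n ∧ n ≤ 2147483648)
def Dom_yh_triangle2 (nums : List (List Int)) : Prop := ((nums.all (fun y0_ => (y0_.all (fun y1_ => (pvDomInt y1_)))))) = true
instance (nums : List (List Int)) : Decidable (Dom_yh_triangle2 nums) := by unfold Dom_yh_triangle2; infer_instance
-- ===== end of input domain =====

-- B replaces A's apex-first rolling DP (descending sweep, three boundary branches, final min over the row)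
-- by a base-first fold with one uniform recurrence, returning state[0]; same O(n^2) cost ("alternative").

-- ===== PORT A =====
-- Indexing/assignment use the total forms pyGetD/pySetD; they are exact under Pre_ (all indices in range).
-- inner loop body of A: the three-branch update of state[j]
def stepA (nums : List (List Int)) (i : Int) (state : List Int) (j : Int) : List Int :=
  if j == i then
    PySem.List.pySetD state j (PySem.List.pyGetD (PySem.List.pyGetD nums i []) j 0 + PySem.List.pyGetD state (j - 1) 0)
  else if j == 0 then
    PySem.List.pySetD state j (PySem.List.pyGetD (PySem.List.pyGetD nums i []) j 0 + PySem.List.pyGetD state j 0)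
  else
    PySem.List.pySetD state j (PySem.List.pyGetD (PySem.List.pyGetD nums i []) j 0 +
      min (PySem.List.pyGetD state (j - 1) 0) (PySem.List.pyGetD state j 0))

-- one iteration of A's outer loop: 'for j in range(i, -1, -1): …'
def rowPassA (nums : List (List Int)) (state : List Int) (i : Int) : List Int :=
  (PySem.List.pyRange i (-1) (-1)).foldl (stepA nums i) state

def yh_triangle2 (nums : List (List Int)) : Int :=
  let n : Int := (nums.length : Int)
  let state : List Int := List.replicate nums.length (0 : Int)
  let state : List Int := PySem.List.pySetD state 0 (PySem.List.pyGetD (PySem.List.pyGetD nums 0 []) 0 0)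
  let state : List Int := (PySem.List.pyRange 1 n 1).foldl (rowPassA nums) state
  -- min(state): state is nonempty under Pre_ (n ≥ 1)
  (PySem.List.min? state (fun x => x)).getD 0

-- ===== PORT B =====
-- inner loop body of B: state[j] = row[j] + min(state[j], state[j+1])
def stepB (row : List Int) (state : List Int) (j : Int) : List Int :=
  PySem.List.pySetD state j
    (PySem.List.pyGetD row j 0 + min (PySem.List.pyGetD state j 0) (PySem.List.pyGetD state (j + 1) 0))

-- one iteration of B's outer loop: 'row = nums[i]; for j in range(i + 1): …'
def rowPassB (nums : List (List Int)) (state : List Int) (i : Int) : List Int :=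
  let row := PySem.List.pyGetD nums i []
  (PySem.List.pyRange 0 (i + 1) 1).foldl (stepB row) state

def yh_triangle2_alt (nums : List (List Int)) : Int :=
  let state : List Int := PySem.List.pyGetD nums (-1) []   -- list(nums[-1]); exact under Pre_ (nums ≠ [])
  let state : List Int := (PySem.List.pyRange ((nums.length : Int) - 2) (-1) (-1)).foldl (rowPassB nums) state
  PySem.List.pyGetD state 0 0

-- ===== PRECONDITION & SPEC =====
-- Pre_: exactly the inputs on which the Python A returns (A raises IndexError on an empty list and
-- whenever some row i is shorter than i+1 elements, i.e. on non-triangular input).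
def Pre_yh_triangle2 (nums : List (List Int)) : Prop :=
  nums ≠ [] ∧ ∀ i < nums.length, i < (nums.getD i []).length
instance (nums : List (List Int)) : Decidable (Pre_yh_triangle2 nums) := by
  unfold Pre_yh_triangle2; infer_instance

def pvWitness_yh_triangle2 : List (List Int) := [[2], [3, 4], [6, 5, 7]]

def Spec_yh_triangle2 (nums : List (List Int)) (out : Int) : Prop := out = yh_triangle2_alt nums
instance (nums : List (List Int)) (out : Int) : Decidable (Spec_yh_triangle2 nums out) := by
  unfold Spec_yh_triangle2; infer_instance

-- ===== CLAIM (what is proved, stated in full; the proofs are below) =====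
def Claim_equal_yh_triangle2 : Prop := ∀ (nums : List (List Int)), Dom_yh_triangle2 nums → Pre_yh_triangle2 nums → Spec_yh_triangle2 nums (yh_triangle2 nums)

-- ===== LEMMAS AND PROOFS =====

-- minimum path sum from cell (0, j) of the triangle `rows` down to its base
def minFrom : List (List Int) → Nat → Int
  | [], _ => 0
  | r :: rs, j => r.getD j 0 + min (minFrom rs j) (minFrom rs (j + 1))

-- minimum of f 0, …, f k
def rowMin (f : Nat → Int) : Nat → Int
  | 0 => f 0
  | k + 1 => min (rowMin f k) (f (k + 1))

theorem rowMin_le (f : Nat → Int) {k n : Nat} (h : k ≤ n) : rowMin f n ≤ f k := by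
  induction n with
  | zero => interval_cases k; simp [rowMin]
  | succ m ih =>
    rcases Nat.lt_or_ge k (m + 1) with hk | hk
    · exact le_trans (by simp [rowMin]) (ih (Nat.lt_succ_iff.mp hk))
    · have : k = m + 1 := le_antisymm h hk
      subst this; simp [rowMin]

theorem le_rowMin (f : Nat → Int) {c : Int} {n : Nat} (h : ∀ k ≤ n, c ≤ f k) : c ≤ rowMin f n := by
  induction n with
  | zero => simpa [rowMin] using h 0 (by omega)
  | succ m ih =>
    simp only [rowMin, le_min_iff]
    exact ⟨ih fun k hk => h k (by omega), h (m + 1) (by omega)⟩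

theorem rowMin_congr {f g : Nat → Int} {n : Nat} (h : ∀ k ≤ n, f k = g k) :
    rowMin f n = rowMin g n := by
  induction n with
  | zero => simp [rowMin, h 0 (by omega)]
  | succ m ih =>
    simp only [rowMin]
    rw [ih fun k hk => h k (by omega), h (m + 1) (by omega)]

-- the min-exchange: one top-down DP step preserves min_j (state[j] + best-completion(j))
theorem exchange (st v : Nat → Int) (i : Nat) :
    rowMin (fun j => (if j = i + 1 then st i else if j = 0 then st 0
                      else min (st (j - 1)) (st j)) + v j) (i + 1)
      = rowMin (fun j => st j + min (v j) (v (j + 1))) i := by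
  apply le_antisymm
  · apply le_rowMin
    intro k hk
    rw [← min_add_add_left, le_min_iff]
    constructor
    · refine le_trans (rowMin_le _ (show k ≤ i + 1 by omega)) ?_
      refine add_le_add ?_ (le_refl _)
      rw [if_neg (show ¬ k = i + 1 by omega)]
      by_cases h0 : k = 0
      · subst h0; simp
      · rw [if_neg h0]; exact min_le_right _ _
    · refine le_trans (rowMin_le _ (show k + 1 ≤ i + 1 by omega)) ?_
      refine add_le_add ?_ (le_refl _)
      by_cases hI : k + 1 = i + 1
      · rw [if_pos hI]
        have hki : k = i := by omega
        simp [hki]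
      · rw [if_neg hI, if_neg (show ¬ k + 1 = 0 by omega)]
        simpa using min_le_left (st k) (st (k + 1))
  · apply le_rowMin
    intro k hk
    by_cases h1 : k = i + 1
    · subst h1
      rw [if_pos rfl]
      refine le_trans (rowMin_le _ (le_refl i)) ?_
      exact add_le_add (le_refl _) (min_le_right _ _)
    · by_cases h2 : k = 0
      · subst h2
        rw [if_neg h1, if_pos rfl]
        refine le_trans (rowMin_le _ (show 0 ≤ i by omega)) ?_
        exact add_le_add (le_refl _) (min_le_left _ _)
      · rw [if_neg h1, if_neg h2, ← min_add_add_right, le_min_iff]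
        constructor
        · refine le_trans (rowMin_le _ (show k - 1 ≤ i by omega)) ?_
          refine add_le_add (le_refl _) ?_
          have hk1 : k - 1 + 1 = k := by omega
          exact le_trans (min_le_right _ _) (by rw [hk1])
        · refine le_trans (rowMin_le _ (show k ≤ i by omega)) ?_
          exact add_le_add (le_refl _) (min_le_left _ _)


-- value written at position p by A's pass over row I (in terms of the state before the pass)
def newA (nums : List (List Int)) (st0 : List Int) (I p : Nat) : Int :=
  (nums.getD I []).getD p 0 +
    (if p = I then st0.getD (I - 1) 0 else if p = 0 then st0.getD 0 0
     else min (st0.getD (p - 1) 0) (st0.getD p 0))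

-- value written at position p by B's pass over a row (in terms of the state before the pass)
def newB (row : List Int) (st0 : List Int) (p : Nat) : Int :=
  row.getD p 0 + min (st0.getD p 0) (st0.getD (p + 1) 0)

theorem getD_set_self {l : List Int} {i : Nat} (h : i < l.length) (v d : Int) :
    (l.set i v).getD i d = v := by
  simp [List.getD_eq_getElem?_getD, List.getElem?_set, h]

theorem getD_set_ne {l : List Int} {i j : Nat} (h : i ≠ j) (v d : Int) :
    (l.set i v).getD j d = l.getD j d := by
  simp [List.getD_eq_getElem?_getD, List.getElem?_set, h]

theorem innerA_spec (nums : List (List Int)) (I : Nat) (hI : 1 ≤ I)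
    (st0 : List Int) (hIlen : I < st0.length) :
    ∀ (J : Nat), J ≤ I → ∀ (st1 : List Int), st1.length = st0.length →
      (∀ p : Nat, p ≤ J → st1.getD p 0 = st0.getD p 0) →
      ((PySem.List.pyRange (J : Int) (-1) (-1)).foldl (stepA nums (I : Int)) st1).length = st0.length ∧
      (∀ p : Nat, ((PySem.List.pyRange (J : Int) (-1) (-1)).foldl (stepA nums (I : Int)) st1).getD p 0 =
        if p ≤ J then newA nums st0 I p else st1.getD p 0) := by
  intro J
  induction J with
  | zero =>
    intro _ st1 hlen hagree
    have hcons : PySem.List.pyRange (0 : Int) (-1) (-1) =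
        (0 : Int) :: PySem.List.pyRange (-1) (-1) (-1) :=
      PySem.List.pyRange_neg_one_cons (by omega)
    have hnil : PySem.List.pyRange (-1 : Int) (-1) (-1) = [] :=
      PySem.List.pyRange_neg_one_eq_nil (by omega)
    rw [Nat.cast_zero, hcons, hnil]
    simp only [List.foldl_cons, List.foldl_nil]
    have hne : ¬ ((0 : Int) == (I : Int)) = true := by
      simp only [beq_iff_eq]; omega
    have hstep : stepA nums (I : Int) st1 0 =
        st1.set 0 ((nums.getD I []).getD 0 0 + st0.getD 0 0) := by
      simp only [stepA, hne, Bool.false_eq_true, if_false, beq_self_eq_true, if_true]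
      rw [PySem.List.pyGetD_natCast, PySem.List.pyGetD_zero, PySem.List.pyGetD_zero,
        hagree 0 (by omega)]
      simp [PySem.List.pySetD_of_nonneg]
    rw [hstep]
    refine ⟨by simp [hlen], ?_⟩
    intro p
    by_cases hp : p = 0
    · subst hp
      rw [getD_set_self (by omega), if_pos (le_refl 0)]
      simp [newA, if_neg (show ¬ (0 = I) by omega)]
    · rw [getD_set_ne (by omega), if_neg (by omega)]
  | succ K ih =>
    intro hJ st1 hlen hagree
    have hcons : PySem.List.pyRange ((K + 1 : Nat) : Int) (-1) (-1) =
        ((K + 1 : Nat) : Int) :: PySem.List.pyRange (((K + 1 : Nat) : Int) - 1) (-1) (-1) :=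
      PySem.List.pyRange_neg_one_cons (by push_cast; omega)
    have hc : ((K + 1 : Nat) : Int) - 1 = ((K : Nat) : Int) := by push_cast; omega
    rw [hcons, hc]
    simp only [List.foldl_cons]
    -- the step writes newA at position K+1
    have hval : stepA nums (I : Int) st1 ((K + 1 : Nat) : Int) =
        st1.set (K + 1) (newA nums st0 I (K + 1)) := by
      simp only [stepA, beq_iff_eq, PySem.List.pySetD_natCast]
      have h1 : PySem.List.pyGetD (PySem.List.pyGetD nums (I : Int) []) ((K + 1 : Nat) : Int) 0 =
          (nums.getD I []).getD (K + 1) 0 := by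
        rw [show ((I : Nat) : Int) = ((I : Nat) : Int) from rfl]
        rw [PySem.List.pyGetD_natCast, PySem.List.pyGetD_natCast]
      have h2 : PySem.List.pyGetD st1 (((K + 1 : Nat) : Int) - 1) 0 = st0.getD K 0 := by
        rw [hc, PySem.List.pyGetD_natCast, hagree K (by omega)]
      have h3 : PySem.List.pyGetD st1 ((K + 1 : Nat) : Int) 0 = st0.getD (K + 1) 0 := by
        rw [PySem.List.pyGetD_natCast, hagree (K + 1) (by omega)]
      by_cases hKI : K + 1 = I
      · rw [if_pos (by exact_mod_cast hKI)]
        rw [h1, h2]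
        simp only [newA]
        rw [if_pos hKI, hKI]
        have : I - 1 = K := by omega
        rw [this]
      · rw [if_neg (by exact_mod_cast hKI), if_neg (by simp only [Nat.cast_add]; omega)]
        rw [h1, h2, h3]
        simp only [newA]
        rw [if_neg hKI, if_neg (by omega)]
        norm_num
    rw [hval]
    have hlen' : (st1.set (K + 1) (newA nums st0 I (K + 1))).length = st0.length := by
      simp [hlen]
    have hagree' : ∀ p : Nat, p ≤ K →
        (st1.set (K + 1) (newA nums st0 I (K + 1))).getD p 0 = st0.getD p 0 := by
      intro p hp
      rw [getD_set_ne (by omega), hagree p (by omega)]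
    obtain ⟨hl2, hg2⟩ := ih (by omega) _ hlen' hagree'
    refine ⟨hl2, ?_⟩
    intro p
    rw [hg2 p]
    by_cases hp : p ≤ K
    · rw [if_pos hp, if_pos (by omega)]
    · rw [if_neg hp]
      by_cases hp2 : p = K + 1
      · subst hp2
        rw [if_pos (le_refl _), getD_set_self (by omega)]
      · rw [if_neg (by omega), getD_set_ne (by omega)]

theorem innerB_spec (row st0 : List Int) (I : Nat) (hIlen : I + 1 ≤ st0.length) :
    ∀ (m a : Nat), a + m = I + 1 → ∀ (st1 : List Int), st1.length = st0.length →
      (∀ p : Nat, a ≤ p → st1.getD p 0 = st0.getD p 0) →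
      ((PySem.List.pyRange (a : Int) ((I : Int) + 1) 1).foldl (stepB row) st1).length = st0.length ∧
      (∀ p : Nat, ((PySem.List.pyRange (a : Int) ((I : Int) + 1) 1).foldl (stepB row) st1).getD p 0 =
        if a ≤ p ∧ p ≤ I then newB row st0 p else st1.getD p 0) := by
  intro m
  induction m with
  | zero =>
    intro a ha st1 hlen hagree
    have hnil : PySem.List.pyRange (a : Int) ((I : Int) + 1) 1 = [] :=
      PySem.List.pyRange_one_eq_nil (by omega)
    rw [hnil]
    simp only [List.foldl_nil]
    refine ⟨hlen, ?_⟩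
    intro p
    rw [if_neg (by omega)]
  | succ m ih =>
    intro a ha st1 hlen hagree
    have hcons : PySem.List.pyRange (a : Int) ((I : Int) + 1) 1 =
        (a : Int) :: PySem.List.pyRange ((a : Int) + 1) ((I : Int) + 1) 1 :=
      PySem.List.pyRange_one_cons (by omega)
    have hc : ((a : Int) + 1) = ((a + 1 : Nat) : Int) := by push_cast; omega
    rw [hcons, hc]
    simp only [List.foldl_cons]
    have hval : stepB row st1 (a : Int) = st1.set a (newB row st0 a) := by
      simp only [stepB, PySem.List.pySetD_natCast, PySem.List.pyGetD_natCast]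
      rw [hc, PySem.List.pyGetD_natCast, hagree a (le_refl a), hagree (a + 1) (by omega)]
      rfl
    rw [hval]
    have hlen' : (st1.set a (newB row st0 a)).length = st0.length := by simp [hlen]
    have hagree' : ∀ p : Nat, a + 1 ≤ p → (st1.set a (newB row st0 a)).getD p 0 = st0.getD p 0 := by
      intro p hp
      rw [getD_set_ne (by omega), hagree p (by omega)]
    obtain ⟨hl2, hg2⟩ := ih (a + 1) (by omega) _ hlen' hagree'
    refine ⟨hl2, ?_⟩
    intro p
    rw [hg2 p]
    by_cases hp : a + 1 ≤ p ∧ p ≤ I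
    · rw [if_pos hp, if_pos (by omega)]
    · rw [if_neg hp]
      by_cases hp2 : p = a
      · subst hp2
        rw [if_pos (by omega), getD_set_self (by omega)]
      · rw [if_neg (by omega), getD_set_ne (by omega)]

-- A's loop invariant after processing rows 1..K
def InvA (nums : List (List Int)) (K : Nat) (st : List Int) : Prop :=
  st.length = nums.length ∧
  rowMin (fun j => st.getD j 0 +
    min (minFrom (nums.drop (K + 1)) j) (minFrom (nums.drop (K + 1)) (j + 1))) K = minFrom nums 0

-- B's loop invariant when the suffix starting at row k has been folded
def InvB (nums : List (List Int)) (k : Nat) (st : List Int) : Prop :=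
  st.length = (nums.getD (nums.length - 1) []).length ∧
  ∀ j ≤ k, st.getD j 0 = minFrom (nums.drop k) j

theorem rowPassA_spec (nums : List (List Int)) (I : Nat) (hI : 1 ≤ I) (hIn : I < nums.length)
    (st : List Int) (h : InvA nums (I - 1) st) :
    InvA nums I (rowPassA nums st (I : Int)) := by
  obtain ⟨hlen, hmin⟩ := h
  obtain ⟨hl, hg⟩ := innerA_spec nums I hI st (by rw [hlen]; exact hIn) I (le_refl I) st rfl
    (fun p _ => rfl)
  have hdrop : nums.drop I = (nums.getD I []) :: nums.drop (I + 1) := by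
    rw [List.getD_eq_getElem _ _ hIn]
    exact List.drop_eq_getElem_cons hIn
  have hIm : I - 1 + 1 = I := by omega
  constructor
  · simp only [rowPassA]
    rw [hl, hlen]
  · simp only [rowPassA]
    rw [rowMin_congr (g := fun j =>
      (if j = I then st.getD (I - 1) 0 else if j = 0 then st.getD 0 0
       else min (st.getD (j - 1) 0) (st.getD j 0)) + minFrom (nums.drop I) j)
      (fun k hk => by
        rw [hg k, if_pos hk]
        simp only [newA]
        conv_rhs => rw [hdrop]
        simp only [minFrom]
        ring)]
    have hex := exchange (fun j => st.getD j 0) (fun j => minFrom (nums.drop I) j) (I - 1)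
    simp only [hIm] at hex
    rw [hex]
    rw [hIm] at hmin
    exact hmin

theorem rowPassB_spec (nums : List (List Int)) (i : Nat) (hi : i + 1 < nums.length)
    (hL : nums.length ≤ (nums.getD (nums.length - 1) []).length)
    (st : List Int) (h : InvB nums (i + 1) st) :
    InvB nums i (rowPassB nums st (i : Int)) := by
  obtain ⟨hlen, hinv⟩ := h
  have hin : i < nums.length := by omega
  have hIlen : i + 1 ≤ st.length := by
    rw [hlen]
    have := hL
    omega
  obtain ⟨hl, hg⟩ := innerB_spec (nums.getD i []) st i hIlen (i + 1) 0 (by omega) st rfl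
    (fun p _ => rfl)
  have hdrop : nums.drop i = (nums.getD i []) :: nums.drop (i + 1) := by
    rw [List.getD_eq_getElem _ _ hin]
    exact List.drop_eq_getElem_cons hin
  have hrw : rowPassB nums st (i : Int) =
      (PySem.List.pyRange ((0 : Nat) : Int) ((i : Int) + 1) 1).foldl (stepB (nums.getD i [])) st := by
    simp only [rowPassB, PySem.List.pyGetD_natCast, Nat.cast_zero]
  constructor
  · rw [hrw, hl, hlen]
  · intro j hj
    rw [hrw, hg j, if_pos (by omega)]
    simp only [newB]
    rw [hinv j (by omega), hinv (j + 1) (by omega)]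
    conv_rhs => rw [hdrop]
    simp only [minFrom]

theorem outerA_spec (nums : List (List Int)) (st0 : List Int) (h0 : InvA nums 0 st0) :
    ∀ (K : Nat), K + 1 ≤ nums.length →
      InvA nums K ((PySem.List.pyRange 1 ((K : Int) + 1) 1).foldl (rowPassA nums) st0) := by
  intro K
  induction K with
  | zero =>
    intro _
    rw [Nat.cast_zero, zero_add, PySem.List.pyRange_one_eq_nil (by omega)]
    simpa using h0
  | succ K ih =>
    intro hK
    have hsplit : PySem.List.pyRange 1 (((K + 1 : Nat) : Int) + 1) 1 =
        PySem.List.pyRange 1 ((K : Int) + 1) 1 ++ [(K : Int) + 1] := by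
      have : ((K + 1 : Nat) : Int) + 1 = ((K : Int) + 1) + 1 := by push_cast; ring
      rw [this]
      exact PySem.List.pyRange_one_succ_right (by omega)
    rw [hsplit, List.foldl_append]
    simp only [List.foldl_cons, List.foldl_nil]
    have hc : ((K : Int) + 1) = ((K + 1 : Nat) : Int) := by push_cast; ring
    rw [hc]
    have := rowPassA_spec nums (K + 1) (by omega) (by omega)
      ((PySem.List.pyRange 1 ((K : Int) + 1) 1).foldl (rowPassA nums) st0)
      (by simpa using ih (by omega))
    exact this

theorem outerB_spec (nums : List (List Int))
    (hL : nums.length ≤ (nums.getD (nums.length - 1) []).length) :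
    ∀ (i : Nat), i + 2 ≤ nums.length → ∀ (st : List Int), InvB nums (i + 1) st →
      InvB nums 0 ((PySem.List.pyRange (i : Int) (-1) (-1)).foldl (rowPassB nums) st) := by
  intro i
  induction i with
  | zero =>
    intro hn st hst
    rw [Nat.cast_zero, PySem.List.pyRange_neg_one_cons (by omega),
      PySem.List.pyRange_neg_one_eq_nil (by omega)]
    simp only [List.foldl_cons, List.foldl_nil]
    exact rowPassB_spec nums 0 (by omega) hL st hst
  | succ i ih =>
    intro hn st hst
    rw [PySem.List.pyRange_neg_one_cons (by push_cast; omega)]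
    simp only [List.foldl_cons]
    have hc : ((i + 1 : Nat) : Int) - 1 = ((i : Nat) : Int) := by push_cast; ring
    rw [hc]
    exact ih (by omega) _ (rowPassB_spec nums (i + 1) (by omega) hL st hst)

theorem foldl_min_eq_rowMin (x : Int) (t : List Int) :
    t.foldl min x = rowMin (fun j => (x :: t).getD j 0) t.length := by
  induction t using List.reverseRecOn with
  | nil => simp [rowMin]
  | append_singleton t y ih =>
    rw [List.foldl_append]
    simp only [List.foldl_cons, List.foldl_nil, List.length_append, List.length_singleton]
    simp only [rowMin]
    have hassoc : x :: (t ++ [y]) = (x :: t) ++ [y] := rfl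
    have hlast : (x :: (t ++ [y])).getD (t.length + 1) 0 = y := by
      rw [hassoc]
      rw [List.getD_eq_getElem?_getD, List.getElem?_append_right (by simp)]
      simp
    have hleft : rowMin (fun j => (x :: (t ++ [y])).getD j 0) t.length =
        rowMin (fun j => (x :: t).getD j 0) t.length := by
      apply rowMin_congr
      intro k hk
      rw [hassoc, List.getD_eq_getElem?_getD, List.getElem?_append_left (by simp; omega),
        ← List.getD_eq_getElem?_getD]
    rw [hlast, hleft, ih]

theorem A_eq_minFrom (nums : List (List Int)) (hpre : Pre_yh_triangle2 nums) :
    yh_triangle2 nums = minFrom nums 0 := by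
  obtain ⟨hne, hrows⟩ := hpre
  have hn : 1 ≤ nums.length := List.length_pos_iff.mpr hne
  simp only [yh_triangle2]
  set st0 := PySem.List.pySetD (List.replicate nums.length (0 : Int)) 0
      (PySem.List.pyGetD (PySem.List.pyGetD nums 0 []) 0 0) with hst0
  have hst0' : st0 = (List.replicate nums.length (0 : Int)).set 0 ((nums.getD 0 []).getD 0 0) := by
    rw [hst0, PySem.List.pyGetD_zero, PySem.List.pyGetD_zero]
    simp [PySem.List.pySetD_of_nonneg]
  have h0 : InvA nums 0 st0 := by
    constructor
    · rw [hst0']; simp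
    · cases nums with
      | nil => exact absurd rfl hne
      | cons r rs =>
        simp only [rowMin]
        rw [hst0', getD_set_self (by simp)]
        simp [minFrom]
  have hK := outerA_spec nums st0 h0 (nums.length - 1) (by omega)
  have hcast : ((nums.length - 1 : Nat) : Int) + 1 = (nums.length : Int) := by omega
  rw [hcast] at hK
  obtain ⟨hlenf, hminf⟩ := hK
  have hdropn : nums.drop (nums.length - 1 + 1) = [] := by
    have h : nums.length - 1 + 1 = nums.length := by omega
    rw [h, List.drop_length]
  rw [hdropn] at hminf
  have hminf' : rowMin (fun j =>
      ((PySem.List.pyRange 1 (nums.length : Int) 1).foldl (rowPassA nums) st0).getD j 0)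
      (nums.length - 1) = minFrom nums 0 := by
    rw [← hminf]
    apply rowMin_congr
    intro k hk
    simp [minFrom]
  set fst := (PySem.List.pyRange 1 (nums.length : Int) 1).foldl (rowPassA nums) st0 with hfst
  have hflen : fst.length = nums.length := hlenf
  obtain ⟨x, t, hxt⟩ : ∃ x t, fst = x :: t := by
    cases hfstc : fst with
    | nil => rw [hfstc] at hflen; simp at hflen; omega
    | cons x t => exact ⟨x, t, rfl⟩
  rw [hxt, PySem.List.min?_id_cons, Option.getD_some, foldl_min_eq_rowMin]
  have htl : t.length = nums.length - 1 := by
    rw [hxt] at hflen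
    simp at hflen
    omega
  rw [htl, ← hxt]
  exact hminf'

theorem B_eq_minFrom (nums : List (List Int)) (hpre : Pre_yh_triangle2 nums) :
    yh_triangle2_alt nums = minFrom nums 0 := by
  obtain ⟨hne, hrows⟩ := hpre
  have hn : 1 ≤ nums.length := List.length_pos_iff.mpr hne
  have hL : nums.length ≤ (nums.getD (nums.length - 1) []).length := by
    have := hrows (nums.length - 1) (by omega)
    omega
  simp only [yh_triangle2_alt]
  have hinit : PySem.List.pyGetD nums (-1) [] = nums.getD (nums.length - 1) [] := by
    rw [PySem.List.pyGetD_neg_one nums [] hne, List.getLast_eq_getElem,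
      List.getD_eq_getElem _ _ (by omega : nums.length - 1 < nums.length)]
  have hdrop : nums.drop (nums.length - 1) = [nums.getD (nums.length - 1) []] := by
    rw [List.getD_eq_getElem _ _ (by omega : nums.length - 1 < nums.length),
      List.drop_eq_getElem_cons (by omega : nums.length - 1 < nums.length)]
    have h : nums.length - 1 + 1 = nums.length := by omega
    rw [h, List.drop_length]
  have hInvInit : InvB nums (nums.length - 1) (PySem.List.pyGetD nums (-1) []) := by
    constructor
    · rw [hinit]
    · intro j hj
      rw [hinit, hdrop]
      simp [minFrom]
  by_cases h1 : nums.length = 1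
  · have hc : (nums.length : Int) - 2 = -1 := by omega
    rw [hc, PySem.List.pyRange_neg_one_eq_nil (by omega)]
    simp only [List.foldl_nil]
    rw [PySem.List.pyGetD_zero]
    have hres := hInvInit.2 0 (by omega)
    rw [h1] at hres
    simpa using hres
  · have hc : (nums.length : Int) - 2 = ((nums.length - 2 : Nat) : Int) := by omega
    rw [hc]
    have hstep := outerB_spec nums hL (nums.length - 2) (by omega)
      (PySem.List.pyGetD nums (-1) []) (by
        have h : nums.length - 2 + 1 = nums.length - 1 := by omega
        rw [h]
        exact hInvInit)
    rw [PySem.List.pyGetD_zero]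
    have hres := hstep.2 0 (by omega)
    simpa using hres

-- ===== VERDICT (by name: the statement is the Claim_ definition above) =====
theorem yh_triangle2_spec : Claim_equal_yh_triangle2 := by
  intro nums _ hpre
  unfold Spec_yh_triangle2
  rw [A_eq_minFrom nums hpre, B_eq_minFrom nums hpre]
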